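-- pv_equiv track=rewrite | github.com/ujiujiujiuji/AtCoder | Perfect_Bus.py | hantei2
-- ===== SOURCE A (Python) =====
-- def hantei2(initial_people, num_list):
--     if (sum(num_list) + initial_people) >= 0:
--         for i, num in enumerate(num_list):
--             initial_people += num
--             if initial_people < 0:
--                 return False
--         return True
--     else:
--         return False
-- ===== SOURCE B (Python) =====
-- def hantei2(initial_people, num_list):
--     if not num_list:
--         return initial_people >= 0
--     prefixes = []
--     s = 0
--     for num in num_list:
--         s += num
--         prefixes.append(s)
--     return initial_people + min(prefixes) >= 0
-- ===== Notes on version B (the rewrite author's own statement) =====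
-- stated objective: simpler
-- what changed: A's early-return scan guarded by a total-sum pre-check is replaced by building the prefix sums once and returning a single comparison initial_people + min(prefixes) >= 0 (empty list handled as initial_people >= 0).
import Mathlib
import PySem

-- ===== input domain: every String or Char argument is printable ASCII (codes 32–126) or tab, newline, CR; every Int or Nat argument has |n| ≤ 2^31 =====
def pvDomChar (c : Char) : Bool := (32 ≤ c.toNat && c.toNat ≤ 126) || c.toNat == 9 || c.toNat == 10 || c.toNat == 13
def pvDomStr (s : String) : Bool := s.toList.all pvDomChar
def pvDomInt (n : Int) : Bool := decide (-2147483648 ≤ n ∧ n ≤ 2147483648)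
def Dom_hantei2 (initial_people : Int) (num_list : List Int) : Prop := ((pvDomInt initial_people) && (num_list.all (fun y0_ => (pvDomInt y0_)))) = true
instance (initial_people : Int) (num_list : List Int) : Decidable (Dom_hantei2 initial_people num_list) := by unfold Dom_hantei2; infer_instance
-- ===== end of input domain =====

-- B replaces A's early-return scan (guarded by a total-sum pre-check) by build-prefix-sums-then-min:
-- one comparison `initial_people + min(prefixes) >= 0`, with the empty list handled as `initial_people >= 0`.


-- ===== PORT A =====
-- the for-loop with early return: add each num, fail as soon as the running total is negative
def hantei2Loop (initial_people : Int) (num_list : List Int) : Bool :=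
  match num_list with
  | [] => true
  | num :: rest =>
    if initial_people + num < 0 then false else hantei2Loop (initial_people + num) rest

def hantei2 (initial_people : Int) (num_list : List Int) : Bool :=
  if num_list.sum + initial_people ≥ 0 then hantei2Loop initial_people num_list
  else false

-- ===== PORT B =====
def hantei2_alt (initial_people : Int) (num_list : List Int) : Bool :=
  if num_list = [] then decide (initial_people ≥ 0)
  else
    -- the accumulation loop: state = (prefixes, s)
    let st := num_list.foldl (fun (st : List Int × Int) num => (st.1 ++ [st.2 + num], st.2 + num)) ([], 0)
    match PySem.List.min? st.1 (fun x => x) with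
    | some m => decide (initial_people + m ≥ 0)
    | none => false

-- ===== PRECONDITION & SPEC =====
def Spec_hantei2 (initial_people : Int) (num_list : List Int) (out : Bool) : Prop := out = hantei2_alt initial_people num_list
instance (initial_people : Int) (num_list : List Int) (out : Bool) : Decidable (Spec_hantei2 initial_people num_list out) := by unfold Spec_hantei2; infer_instance

-- ===== CLAIM (what is proved, stated in full; the proofs are below) =====
def Claim_equal_hantei2 : Prop := ∀ (initial_people : Int) (num_list : List Int), Dom_hantei2 initial_people num_list → Spec_hantei2 initial_people num_list (hantei2 initial_people num_list)

-- ===== LEMMAS AND PROOFS =====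

/-- The prefix sums of `l` starting from accumulator `s`. -/
def prefs (s : Int) (l : List Int) : List Int :=
  match l with
  | [] => []
  | n :: t => (s + n) :: prefs (s + n) t

theorem prefs_ne_nil (s : Int) (l : List Int) (h : l ≠ []) : prefs s l ≠ [] := by
  cases l with
  | nil => exact absurd rfl h
  | cons n t => simp [prefs]

theorem foldl_prefs (l : List Int) (acc : List Int) (s : Int) :
    (l.foldl (fun (st : List Int × Int) num => (st.1 ++ [st.2 + num], st.2 + num)) (acc, s)).1
      = acc ++ prefs s l := by
  induction l generalizing acc s with
  | nil => simp [prefs]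
  | cons n t ih => simp [prefs, List.foldl, ih]

theorem prefs_shift (s : Int) (l : List Int) : prefs s l = (prefs 0 l).map (s + ·) := by
  induction l generalizing s with
  | nil => simp [prefs]
  | cons n t ih =>
    simp only [prefs, List.map_cons]
    refine List.cons_eq_cons.mpr ⟨by omega, ?_⟩
    rw [ih (s + n), ih (0 + n), List.map_map]
    apply List.map_congr_left
    intro a _
    simp; omega

theorem loop_iff (l : List Int) (ip : Int) :
    hantei2Loop ip l = true ↔ ∀ p ∈ prefs 0 l, 0 ≤ ip + p := by
  induction l generalizing ip with
  | nil => simp [hantei2Loop, prefs]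
  | cons n t ih =>
    simp only [hantei2Loop, prefs, List.mem_cons]
    rw [prefs_shift (0 + n) t]
    by_cases h : ip + n < 0
    · simp only [if_pos h]
      constructor
      · intro hf; exact absurd hf (by simp)
      · intro hall
        have := hall (0 + n) (Or.inl rfl)
        omega
    · simp only [if_neg h]
      rw [ih (ip + n)]
      constructor
      · intro hall p hp
        rcases hp with rfl | hp
        · omega
        · rcases List.mem_map.mp hp with ⟨q, hq, rfl⟩
          have := hall q hq; omega
      · intro hall p hp
        have := hall (0 + n + p) (Or.inr (List.mem_map.mpr ⟨p, hp, rfl⟩))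
        omega

theorem sum_mem_prefs (l : List Int) (h : l ≠ []) (s : Int) : s + l.sum ∈ prefs s l := by
  induction l generalizing s with
  | nil => exact absurd rfl h
  | cons n t ih =>
    cases t with
    | nil => simp [prefs]
    | cons m u =>
      have h3 : s + (n :: m :: u).sum = (s + n) + (m :: u).sum := by
        simp [List.sum_cons]; ring
      rw [show prefs s (n :: m :: u) = (s + n) :: prefs (s + n) (m :: u) from rfl,
        List.mem_cons, h3]
      exact Or.inr (ih (by simp) (s + n))

theorem foldl_min_aux (l : List Int) (acc : Option Int) (m : Int)
    (h : l.foldl (fun acc x =>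
        match acc with
        | none => some x
        | some m => if x < m then some x else some m) acc = some m) :
    (∀ a, acc = some a → m ≤ a) ∧ ∀ y ∈ l, m ≤ y := by
  induction l generalizing acc with
  | nil =>
    simp [List.foldl] at h
    subst h
    exact ⟨fun a ha => by simp_all, by simp⟩
  | cons x t ih =>
    simp only [List.foldl] at h
    cases acc with
    | none =>
      obtain ⟨h1, h2⟩ := ih (some x) h
      exact ⟨by simp, fun y hy => by
        rcases List.mem_cons.mp hy with rfl | hy
        · exact h1 y rfl
        · exact h2 y hy⟩
    | some a =>
      by_cases hx : x < a
      · simp only [if_pos hx] at h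
        obtain ⟨h1, h2⟩ := ih (some x) h
        have hma := h1 x rfl
        exact ⟨fun b hb => by injection hb with hb; omega,
          fun y hy => by
            rcases List.mem_cons.mp hy with rfl | hy
            · exact h1 y rfl
            · exact h2 y hy⟩
      · simp only [if_neg hx] at h
        obtain ⟨h1, h2⟩ := ih (some a) h
        have hma := h1 a rfl
        exact ⟨fun b hb => by injection hb with hb; omega,
          fun y hy => by
            rcases List.mem_cons.mp hy with rfl | hy
            · omega
            · exact h2 y hy⟩

theorem min?_int_isMin (l : List Int) (m : Int)
    (h : PySem.List.min? l (fun x => x) = some m) : ∀ y ∈ l, m ≤ y := by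
  simp only [PySem.List.min?] at h
  rw [List.foldl_ext _ (fun acc x =>
      match acc with
      | none => some x
      | some m => if x < m then some x else some m) none
      (fun acc x _ => by cases acc <;> rfl)] at h
  exact (foldl_min_aux l none m h).2

-- ===== VERDICT (by name: the statement is the Claim_ definition above) =====
theorem hantei2_spec : Claim_equal_hantei2 := by
  intro ip l _
  unfold Spec_hantei2 hantei2 hantei2_alt
  cases l with
  | nil => simp [hantei2Loop]
  | cons n t =>
    simp only [if_neg (List.cons_ne_nil n t)]
    rw [foldl_prefs (n :: t) [] 0, List.nil_append]
    obtain ⟨m, hm⟩ : ∃ m, PySem.List.min? (prefs 0 (n :: t)) (fun x => x) = some m := by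
      cases hp : prefs 0 (n :: t) with
      | nil => exact absurd hp (prefs_ne_nil 0 (n :: t) (by simp))
      | cons a b =>
        rw [PySem.List.min?_eq_some_minD _ _ a (by simp)]
        exact ⟨_, rfl⟩
    rw [hm]
    have hmem : m ∈ prefs 0 (n :: t) := PySem.List.min?_mem hm
    have hmin : ∀ y ∈ prefs 0 (n :: t), m ≤ y := min?_int_isMin _ m hm
    have hsum : (n :: t).sum ∈ prefs 0 (n :: t) := by
      simpa using sum_mem_prefs (n :: t) (by simp) 0
    by_cases hg : (n :: t).sum + ip ≥ 0
    · rw [if_pos hg]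
      rw [Bool.eq_iff_iff, loop_iff]
      constructor
      · intro hall
        have := hall m hmem; simp; omega
      · intro hb p hp
        have h1 : m ≤ p := hmin p hp
        simp at hb; omega
    · rw [if_neg hg]
      have h1 : m ≤ (n :: t).sum := hmin _ hsum
      have : ¬ (ip + m ≥ 0) := by omega
      simp [this]
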